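-- pv_equiv track=rewrite | github.com/botfed/botfed-py | botfed/aero/helpers.py | get_quote_token
-- ===== SOURCE A (Python) =====
-- QUOTE_TOKENS = [
--     "USDC",
--     "USDT",
--     "USD+",
--     "cbBTC",
--     "WBTC",
--     "tBTC",
--     "WETH",
-- ]
--
-- def get_quote_token(symbol0, symbol1):
--
--     quote_curr = None
--     quote_curr_pos = None
--     for token in QUOTE_TOKENS:
--         if token.upper() == symbol0.upper():
--             quote_curr = token
--             base_curr = symbol1
--             quote_curr_pos = 0
--             break
--         elif token.upper() == symbol1.upper():
--             quote_curr = token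
--             base_curr = symbol0
--             quote_curr_pos = 1
--             break
--     return quote_curr, base_curr, quote_curr_pos
-- ===== SOURCE B (Python) =====
-- QUOTE_TOKENS = [
--     "USDC",
--     "USDT",
--     "USD+",
--     "cbBTC",
--     "WBTC",
--     "tBTC",
--     "WETH",
-- ]
--
-- _PRIO = {t.upper(): i for i, t in enumerate(QUOTE_TOKENS)}
--
--
-- def get_quote_token(symbol0, symbol1):
--     cands = []
--     p0 = _PRIO.get(symbol0.upper())
--     if p0 is not None:
--         cands.append((p0, symbol1, 0))
--     p1 = _PRIO.get(symbol1.upper())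
--     if p1 is not None:
--         cands.append((p1, symbol0, 1))
--     p, base, pos = min(cands, key=lambda c: c[0])
--     return QUOTE_TOKENS[p], base, pos
-- ===== Notes on version B (the rewrite author's own statement) =====
-- stated objective: idiomatic
-- what changed: B replaces A's ordered scan over QUOTE_TOKENS (early break, lazily-assigned base_curr) by a precomputed uppercase->priority dict; it collects the (priority, base, position) candidates for the two symbols and takes the min by priority, instead of up to 14 sequential string comparisons.
import Mathlib
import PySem

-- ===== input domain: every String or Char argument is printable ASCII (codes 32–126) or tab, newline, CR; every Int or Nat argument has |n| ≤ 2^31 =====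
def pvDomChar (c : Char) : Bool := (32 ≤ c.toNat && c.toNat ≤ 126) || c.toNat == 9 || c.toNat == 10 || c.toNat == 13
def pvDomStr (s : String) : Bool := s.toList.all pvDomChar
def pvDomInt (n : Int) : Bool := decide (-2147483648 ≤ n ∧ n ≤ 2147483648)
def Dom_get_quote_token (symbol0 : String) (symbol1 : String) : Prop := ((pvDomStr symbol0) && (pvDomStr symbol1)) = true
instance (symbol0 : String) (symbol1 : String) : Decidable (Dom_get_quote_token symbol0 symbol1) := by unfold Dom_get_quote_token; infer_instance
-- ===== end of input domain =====

-- B replaces A's priority scan over QUOTE_TOKENS by a precomputed uppercase→index dict and a single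
-- comparison of the two looked-up priorities (idiomatic/alternative; same behaviour wherever A returns).

-- ===== PORT A =====
def QUOTE_TOKENS : List String := ["USDC", "USDT", "USD+", "cbBTC", "WBTC", "tBTC", "WETH"]

-- the for-loop with break; `none` = fell through (base_curr unbound → UnboundLocalError, excluded by Pre_)
def gqtLoop (symbol0 : String) (symbol1 : String) : List String → Option (Option String × String × Option Int)
  | [] => none
  | t :: rest =>
    if PySem.Str.upper t == PySem.Str.upper symbol0 then some (some t, symbol1, some 0)
    else if PySem.Str.upper t == PySem.Str.upper symbol1 then some (some t, symbol0, some 1)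
    else gqtLoop symbol0 symbol1 rest

def get_quote_token (symbol0 : String) (symbol1 : String) : Option String × String × Option Int :=
  (gqtLoop symbol0 symbol1 QUOTE_TOKENS).getD (none, "", none)

-- ===== PORT B =====
def QUOTE_TOKENS_B : List String := ["USDC", "USDT", "USD+", "cbBTC", "WBTC", "tBTC", "WETH"]

-- _PRIO = {t.upper(): i for i, t in enumerate(QUOTE_TOKENS)}
def PRIO : PySem.Dict String Int :=
  (PySem.List.enumerate QUOTE_TOKENS_B).foldl (fun d p => d.insert (PySem.Str.upper p.2) p.1) (PySem.Dict.mk [])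

def get_quote_token_alt (symbol0 : String) (symbol1 : String) : Option String × String × Option Int :=
  let cands : List (Int × String × Int) := []
  let cands := match PRIO.get? (PySem.Str.upper symbol0) with
    | some p0 => cands ++ [(p0, symbol1, 0)]
    | none => cands
  let cands := match PRIO.get? (PySem.Str.upper symbol1) with
    | some p1 => cands ++ [(p1, symbol0, 1)]
    | none => cands
  -- min(cands, key=lambda c: c[0]); min([]) raises ValueError (none), excluded by Pre_
  match PySem.List.min? cands (fun c => c.1) with
  | some (p, base, pos) => (PySem.List.pyGet? QUOTE_TOKENS_B p, base, some pos)
  | none => (none, "", none)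

-- ===== PRECONDITION & SPEC =====
-- Pre_ excludes exactly the inputs where neither symbol uppercases to a quote token: there A's
-- `base_curr` was never assigned and A raises UnboundLocalError.
def Pre_get_quote_token (symbol0 : String) (symbol1 : String) : Prop :=
  PySem.Str.upper symbol0 ∈ ["USDC", "USDT", "USD+", "CBBTC", "WBTC", "TBTC", "WETH"] ∨
  PySem.Str.upper symbol1 ∈ ["USDC", "USDT", "USD+", "CBBTC", "WBTC", "TBTC", "WETH"]
instance (symbol0 : String) (symbol1 : String) : Decidable (Pre_get_quote_token symbol0 symbol1) := by
  unfold Pre_get_quote_token; infer_instance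

def pvWitness_get_quote_token : String × String := ("usdc", "WETH")

def Spec_get_quote_token (symbol0 : String) (symbol1 : String) (out : Option String × String × Option Int) : Prop := out = get_quote_token_alt symbol0 symbol1
instance (symbol0 : String) (symbol1 : String) (out : Option String × String × Option Int) : Decidable (Spec_get_quote_token symbol0 symbol1 out) := by unfold Spec_get_quote_token; infer_instance

-- ===== CLAIM (what is proved, stated in full; the proofs are below) =====
def Claim_equal_get_quote_token : Prop := ∀ (symbol0 : String) (symbol1 : String), Dom_get_quote_token symbol0 symbol1 → Pre_get_quote_token symbol0 symbol1 → Spec_get_quote_token symbol0 symbol1 (get_quote_token symbol0 symbol1)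

-- ===== LEMMAS AND PROOFS =====

set_option maxHeartbeats 1000000 in
theorem gqt_main (symbol0 symbol1 : String)
    (hpre : Pre_get_quote_token symbol0 symbol1) :
    get_quote_token symbol0 symbol1 = get_quote_token_alt symbol0 symbol1 := by
  have hP : PRIO = PySem.Dict.mk
      [("USDC", 0), ("USDT", 1), ("USD+", 2), ("CBBTC", 3), ("WBTC", 4), ("TBTC", 5), ("WETH", 6)] := by
    decide
  have e1 : PySem.Str.upper "USDC" = "USDC" := by decide
  have e2 : PySem.Str.upper "USDT" = "USDT" := by decide
  have e3 : PySem.Str.upper "USD+" = "USD+" := by decide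
  have e4 : PySem.Str.upper "cbBTC" = "CBBTC" := by decide
  have e5 : PySem.Str.upper "WBTC" = "WBTC" := by decide
  have e6 : PySem.Str.upper "tBTC" = "TBTC" := by decide
  have e7 : PySem.Str.upper "WETH" = "WETH" := by decide
  unfold Pre_get_quote_token at hpre
  simp only [get_quote_token, get_quote_token_alt, QUOTE_TOKENS, QUOTE_TOKENS_B, gqtLoop, hP,
    e1, e2, e3, e4, e5, e6, e7, PySem.Dict.get?_mk_cons]
  generalize hu0 : PySem.Str.upper symbol0 = u0 at hpre ⊢
  generalize hu1 : PySem.Str.upper symbol1 = u1 at hpre ⊢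
  simp only [List.mem_cons, List.not_mem_nil, or_false] at hpre
  simp only [PySem.Dict.get?]
  clear hP e1 e2 e3 e4 e5 e6 e7 hu0 hu1
  rcases hpre with (h|h|h|h|h|h|h)|(h|h|h|h|h|h|h) <;> subst h <;>
    simp only [String.reduceBEq, reduceIte] <;>
    split_ifs <;> rfl

-- ===== VERDICT (by name: the statement is the Claim_ definition above) =====
theorem get_quote_token_spec : Claim_equal_get_quote_token := by
  intro s0 s1 _ hpre
  exact gqt_main s0 s1 hpre
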